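-- pv_equiv track=rewrite | github.com/cp2k/cp2k | tools/minimax_tools/minimax_to_fortran_source.py | format_array
-- ===== SOURCE A (Python) =====
-- from typing import Any, List, Literal
--
-- def format_array(
--     array: List[Any],
--     indent: int,
--     fmt: str = "{}",
--     wrap: int = 5,
--     begin: str = "[",
--     end: str = "]",
-- ) -> List[str]:
--
--     lines: List[str] = [" " * indent + begin]
--     for i, x in enumerate(array):
--         if i % wrap == 0 and i > 0:
--             lines[-1] += "&"
--             lines.append(" " * (indent + 1))
--         lines[-1] += fmt.format(x)
--         if not i + 1 == len(array):
--             lines[-1] += ", "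
--     lines[-1] += end
--
--     return lines
-- ===== SOURCE B (Python) =====
-- def format_array(
--     array,
--     indent,
--     fmt="{}",
--     wrap=5,
--     begin="[",
--     end="]",
-- ):
--     """Format the elements, cut them into wrap-sized chunks, and emit one
--     output line per chunk: the first line opens with `begin`, continuation
--     lines are indented one extra space, and every line but the last ends
--     with the Fortran continuation marker ', &'; the last line closes with
--     `end`."""
--     formatted = [fmt.format(x) for x in array]
--     if not formatted:
--         return [" " * indent + begin + end]
--     chunks = [", ".join(formatted[i:i + wrap]) for i in range(0, len(formatted), wrap)]
--     lines = []
--     prefix = " " * indent + begin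
--     for chunk in chunks[:-1]:
--         lines.append(prefix + chunk + ", &")
--         prefix = " " * (indent + 1)
--     lines.append(prefix + chunks[-1] + end)
--     return lines
-- ===== Notes on version B (the rewrite author's own statement) =====
-- stated objective: simpler
-- what changed: A grows the last line in place, element by element, under an index-modulo test; B formats the elements once, slices them into wrap-sized chunks with range(0, n, wrap) and joins each chunk into one whole line. Pre_ excludes, for nonempty arrays, wrap <= 0 (A raises ZeroDivisionError at wrap = 0, and at negative wrap A's value comes from Python's negative-modulo accident while B's range-based chunking raises) and fmt strings whose braces are not exactly one literal '{}' placeholder (general str.format semantics are beyond the ported domain; where A returns there, B returns the identical value).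
-- outside the precondition, e.g. on format_array([1, 2, 3], 0, '{}', -2, '[', ']'): A returns ['[1, 2, &', ' 3]'], B raises IndexError; on format_array([1, 2, 3], 0, '{0}', 5, '[', ']'): A returns ['[1, 2, 3]'], B returns ['[1, 2, 3]']
import Mathlib
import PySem

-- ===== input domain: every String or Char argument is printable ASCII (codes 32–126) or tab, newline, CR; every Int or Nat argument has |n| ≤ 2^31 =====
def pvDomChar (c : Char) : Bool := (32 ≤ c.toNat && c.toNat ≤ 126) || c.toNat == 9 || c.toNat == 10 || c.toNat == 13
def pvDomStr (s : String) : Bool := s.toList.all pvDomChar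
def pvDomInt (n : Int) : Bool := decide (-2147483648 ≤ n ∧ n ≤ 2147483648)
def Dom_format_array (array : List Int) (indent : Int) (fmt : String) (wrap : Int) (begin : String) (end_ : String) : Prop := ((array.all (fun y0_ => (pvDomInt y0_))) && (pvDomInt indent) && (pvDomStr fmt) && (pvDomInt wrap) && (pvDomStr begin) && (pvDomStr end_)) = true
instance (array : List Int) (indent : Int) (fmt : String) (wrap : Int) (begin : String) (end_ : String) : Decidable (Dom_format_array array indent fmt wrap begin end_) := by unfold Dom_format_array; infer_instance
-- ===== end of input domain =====

-- B formats the elements once, cuts them into wrap-sized chunks and joins each chunk into one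
-- whole output line, instead of A's element-at-a-time mutation of the last line; objective:
-- simpler decomposition, same cost.

-- shared helper: " " * n  (empty for n ≤ 0, exactly as Python)
def pySpaces (n : Int) : List Char := PySem.List.pyRepeat [' '] n

-- shared helper: fmt.format(x) — exact for fmt whose braces are exactly at most one
-- literal "{}" placeholder (guaranteed by Pre_ whenever it is called)
def pyFormatInt : List Char → Int → List Char
  | '{' :: '}' :: rest, x => PySem.Int.toChars x ++ rest
  | c :: rest, x => c :: pyFormatInt rest x
  | [], _ => []

-- ===== PORT A =====
-- the for-loop: state = (done lines, current last line); n = len(array), i = enumerate index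
def formatLoopA (wrap : Int) (fmtcs ind1 : List Char) (n : Nat) :
    List Int → Nat → List (List Char) → List Char → List (List Char) × List Char
  | [], _, done, cur => (done, cur)
  | x :: xs, i, done, cur =>
    let s := if PySem.Int.mod (i : Int) wrap = 0 ∧ 0 < i
             then (done ++ [cur ++ ['&']], ind1) else (done, cur)   -- lines[-1] += "&"; lines.append(" "*(indent+1))
    let cur2 := s.2 ++ pyFormatInt fmtcs x                           -- lines[-1] += fmt.format(x)
    let cur3 := if ¬ (i + 1 = n) then cur2 ++ [',', ' '] else cur2   -- lines[-1] += ", "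
    formatLoopA wrap fmtcs ind1 n xs (i + 1) s.1 cur3

def format_array (array : List Int) (indent : Int) (fmt : String) (wrap : Int) (begin : String) (end_ : String) : List String :=
  let p := formatLoopA wrap fmt.toList (pySpaces (indent + 1)) array.length array 0 []
             (pySpaces indent ++ begin.toList)                       -- lines = [" "*indent + begin]
  ((p.1 ++ [p.2 ++ end_.toList]).map fun cs => String.ofList cs)     -- lines[-1] += end

-- ===== PORT B =====
-- chunks = [", ".join(formatted[i:i + wrap]) for i in range(0, len(formatted), wrap)]
def chunksB (wrap : Int) (formatted : List (List Char)) : List (List Char) :=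
  (PySem.List.pyRange 0 (formatted.length : Int) wrap).map
    (fun i => PySem.Chars.join [',', ' '] (PySem.List.slice formatted (some i) (some (i + wrap))))

-- the for-loop over chunks[:-1] plus the final line: `pre` is the running prefix variable
-- (the [] case is chunks[-1]'s IndexError; Pre_ guarantees it is never reached)
def renderB (ind1 endcs : List Char) : List Char → List (List Char) → List String
  | _pre, [] => []
  | pre, [c] => [String.ofList (pre ++ c ++ endcs)]
  | pre, c :: c' :: rest => String.ofList (pre ++ c ++ [',', ' ', '&']) :: renderB ind1 endcs ind1 (c' :: rest)

def format_array_alt (array : List Int) (indent : Int) (fmt : String) (wrap : Int) (begin : String) (end_ : String) : List String :=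
  let formatted := array.map (pyFormatInt fmt.toList)
  if formatted = [] then [String.ofList (pySpaces indent ++ begin.toList ++ end_.toList)]
  else renderB (pySpaces (indent + 1)) end_.toList (pySpaces indent ++ begin.toList)
         (chunksB wrap formatted)

-- ===== PRECONDITION & SPEC =====
-- Pre_ excludes, for nonempty arrays only: wrap ≤ 0 (A raises ZeroDivisionError at wrap = 0; at
-- negative wrap A still returns but B's range-based chunking raises) and fmt strings whose brace
-- characters are not exactly at most one adjacent '{''}' pair (a literal "{}" placeholder) —
-- str.format's general replacement-field semantics (raising on most such fmt, substituting on e.g.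
-- "{0}") are beyond the ported domain; where A still returns on such fmt, B returns the identical
-- value (both call fmt.format).
def Pre_format_array (array : List Int) (indent : Int) (fmt : String) (wrap : Int) (begin : String) (end_ : String) : Prop :=
  array = [] ∨ (0 < wrap ∧
    (fmt.toList.filter (fun c => c = '{' ∨ c = '}') = []
      ∨ (fmt.toList.filter (fun c => c = '{' ∨ c = '}') = ['{', '}'] ∧ ['{', '}'] <:+: fmt.toList)))

instance (array : List Int) (indent : Int) (fmt : String) (wrap : Int) (begin : String) (end_ : String) : Decidable (Pre_format_array array indent fmt wrap begin end_) := by unfold Pre_format_array; infer_instance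

def pvWitness_format_array : List Int × Int × String × Int × String × String := ([3, 4, 5], 2, "{}", 2, "[", "]")

def Spec_format_array (array : List Int) (indent : Int) (fmt : String) (wrap : Int) (begin : String) (end_ : String) (out : List String) : Prop := out = format_array_alt array indent fmt wrap begin end_
instance (array : List Int) (indent : Int) (fmt : String) (wrap : Int) (begin : String) (end_ : String) (out : List String) : Decidable (Spec_format_array array indent fmt wrap begin end_ out) := by unfold Spec_format_array; infer_instance

-- ===== CLAIM (what is proved, stated in full; the proofs are below) =====
def Claim_equal_format_array : Prop := ∀ (array : List Int) (indent : Int) (fmt : String) (wrap : Int) (begin : String) (end_ : String), Dom_format_array array indent fmt wrap begin end_ → Pre_format_array array indent fmt wrap begin end_ → Spec_format_array array indent fmt wrap begin end_ (format_array array indent fmt wrap begin end_)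

-- ===== LEMMAS AND PROOFS =====

-- proof-side view of B's chunk comprehension: recursive take/drop
def chunksJoinB (w : Nat) (rest : List (List Char)) : List (List Char) :=
  if h : w = 0 ∨ rest = [] then []
  else PySem.Chars.join [',', ' '] (rest.take w) :: chunksJoinB w (rest.drop w)
termination_by rest.length
decreasing_by
  have h1 : w ≠ 0 := fun hw => h (Or.inl hw)
  have h2 : rest ≠ [] := fun hr => h (Or.inr hr)
  have := List.length_pos_iff.mpr h2
  simp only [List.length_drop]
  omega

theorem chunksJoinB_cons (w : Nat) (rest : List (List Char)) (hw : w ≠ 0) (hr : rest ≠ []) :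
    chunksJoinB w rest
      = PySem.Chars.join [',', ' '] (rest.take w) :: chunksJoinB w (rest.drop w) := by
  rw [chunksJoinB.eq_def]
  simp [hw, hr]

theorem chunksJoinB_nil (w : Nat) : chunksJoinB w [] = [] := by
  rw [chunksJoinB.eq_def]; simp

-- range(a, b, s) with positive step, unfolded one element at a time
theorem pyRange_pos_cons (a b s : Int) (hs : 0 < s) :
    PySem.List.pyRange a b s = if a < b then a :: PySem.List.pyRange (a + s) b s else [] := by
  rw [PySem.List.pyRange_of_pos a b hs, PySem.List.pyRange_of_pos (a + s) b hs]
  by_cases hab : a < b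
  · rw [if_pos hab, if_pos hab]
    have hcount : ((b - a + s - 1) / s).toNat
        = (if a + s < b then ((b - (a + s) + s - 1) / s).toNat else 0) + 1 := by
      by_cases h2 : a + s < b
      · rw [if_pos h2]
        have h1 : b - a + s - 1 = (b - (a + s) + s - 1) + 1 * s := by ring
        rw [h1, Int.add_mul_ediv_right _ _ (ne_of_gt hs)]
        have h3 : 0 ≤ (b - (a + s) + s - 1) / s := Int.ediv_nonneg (by omega) (by omega)
        omega
      · rw [if_neg h2]
        have hle : 1 ≤ (b - a + s - 1) / s := by
          rw [Int.le_ediv_iff_mul_le hs]; omega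
        have hlt : (b - a + s - 1) / s < 2 := by
          rw [Int.ediv_lt_iff_lt_mul hs]; omega
        omega
    rw [hcount, List.range_succ_eq_map]
    simp only [List.map_cons, List.map_map]
    congr 1
    · simp
    · congr 1
      funext k
      simp only [Function.comp_apply, Nat.succ_eq_add_one]
      push_cast
      ring
  · rw [if_neg hab, if_neg hab]
    simp

-- B's comprehension over range(a, len, wrap) is the take/drop chunking of the tail from a
theorem chunksB_gen (w : Int) (hw : 0 < w) (full : List (List Char)) :
    ∀ (m : Nat) (rest : List (List Char)), rest.length = m →
    ∀ (a : Int), 0 ≤ a → full.drop a.toNat = rest → a.toNat + rest.length = full.length →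
    (PySem.List.pyRange a (full.length : Int) w).map
        (fun i => PySem.Chars.join [',', ' '] (PySem.List.slice full (some i) (some (i + w))))
      = chunksJoinB w.natAbs rest := by
  intro m
  induction m using Nat.strong_induction_on with
  | _ m ihm =>
  intro rest hlen a ha hdrop hsum
  have hwn : w.natAbs ≠ 0 := by omega
  cases rest with
  | nil =>
    have hge : ¬ a < (full.length : Int) := by simp at hsum; omega
    rw [pyRange_pos_cons a full.length w hw, if_neg hge]
    simp [chunksJoinB_nil]
  | cons r rs =>
    have hlt : a < (full.length : Int) := by
      simp only [List.length_cons] at hsum; omega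
    rw [pyRange_pos_cons a full.length w hw, if_pos hlt, List.map_cons]
    have hhead : PySem.List.slice full (some a) (some (a + w)) = (r :: rs).take w.natAbs := by
      rw [PySem.List.slice_toNat full ha (by omega), hdrop]
      congr 1
      omega
    rw [chunksJoinB_cons w.natAbs (r :: rs) hwn (by simp), hhead]
    congr 1
    have hdrop' : full.drop (a + w).toNat = (r :: rs).drop w.natAbs := by
      rw [show (a + w).toNat = a.toNat + w.natAbs by omega, ← List.drop_drop, hdrop]
    by_cases hsmall : (r :: rs).length ≤ w.natAbs
    · have hge2 : ¬ (a + w) < (full.length : Int) := by omega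
      rw [pyRange_pos_cons (a + w) full.length w hw, if_neg hge2]
      rw [List.drop_eq_nil_of_le hsmall, chunksJoinB_nil]
      simp
    · exact ihm ((r :: rs).drop w.natAbs).length
        (by simp only [List.length_drop]; omega) _ rfl (a + w) (by omega) hdrop'
        (by simp only [List.length_drop] at *; omega)

-- the whole comprehension: chunksB = take/drop chunking (wrap > 0)
theorem chunksB_eq (w : Int) (hw : 0 < w) (formatted : List (List Char)) :
    chunksB w formatted = chunksJoinB w.natAbs formatted := by
  unfold chunksB
  exact chunksB_gen w hw formatted formatted.length formatted rfl 0 le_rfl rfl (by simp)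

-- what A's loop appends while no wrap fires: each element plus its ", " separator
def segJoin (n : Nat) (fmtcs : List Char) : List Int → Nat → List Char
  | [], _ => []
  | x :: xs, j => (pyFormatInt fmtcs x ++ if j + 1 = n then [] else [',', ' ']) ++ segJoin n fmtcs xs (j + 1)

def finishA (endcs : List Char) (p : List (List Char) × List Char) : List String :=
  (p.1 ++ [p.2 ++ endcs]).map fun cs => String.ofList cs

theorem segJoin_cons (n : Nat) (fmtcs : List Char) (x : Int) (xs : List Int) (j : Nat) :
    segJoin n fmtcs (x :: xs) j
      = (pyFormatInt fmtcs x ++ if j + 1 = n then [] else [',', ' ']) ++ segJoin n fmtcs xs (j + 1) := rfl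

theorem renderB_two (ind1 endcs pre c c' : List Char) (l : List (List Char)) :
    renderB ind1 endcs pre (c :: c' :: l)
      = String.ofList (pre ++ c ++ [',', ' ', '&']) :: renderB ind1 endcs ind1 (c' :: l) := rfl

-- Python's `i % wrap == 0` on a Nat index is divisibility by |wrap|
theorem modBridge (wrap : Int) (i : Nat) : PySem.Int.mod (i : Int) wrap = 0 ↔ wrap.natAbs ∣ i := by
  rw [PySem.Int.mod_eq_zero_iff_dvd, ← Int.natAbs_dvd, Int.natCast_dvd_natCast]

theorem notdvd (w i s : Nat) (h : w ∣ i) (h1 : 0 < s) (h2 : s < w) : ¬ w ∣ (i + s) := by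
  intro hd
  have hs : w ∣ s := by simpa using Nat.dvd_sub hd h
  exact absurd (Nat.le_of_dvd h1 hs) (by omega)

-- a segment on which the wrap condition never fires just appends segJoin to the current line
theorem seg (wrap : Int) (fmtcs ind1 : List Char) (n : Nat) (G : List Int) :
    ∀ (rest : List Int) (i : Nat) (done : List (List Char)) (cur : List Char),
    (∀ t, t < G.length → ¬(wrap.natAbs ∣ (i + t) ∧ 0 < i + t)) →
    formatLoopA wrap fmtcs ind1 n (G ++ rest) i done cur
      = formatLoopA wrap fmtcs ind1 n rest (i + G.length) done (cur ++ segJoin n fmtcs G i) := by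
  induction G with
  | nil => intro rest i done cur _; simp [segJoin]
  | cons x G ih =>
    intro rest i done cur h
    have h0 : ¬(wrap.natAbs ∣ (i + 0) ∧ 0 < i + 0) := h 0 (by simp)
    rw [Nat.add_zero] at h0
    have hnc : ¬(PySem.Int.mod (i : Int) wrap = 0 ∧ 0 < i) := by
      intro hcc
      exact h0 ⟨(modBridge wrap i).mp hcc.1, hcc.2⟩
    rw [List.cons_append]
    simp only [formatLoopA, if_neg hnc]
    rw [ih rest (i + 1) done _ (by
      intro t ht
      have := h (t + 1) (by simp; omega)
      rwa [show i + (t + 1) = i + 1 + t by omega] at this)]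
    rw [show i + (x :: G).length = i + 1 + G.length by simp only [List.length_cons]; omega]
    congr 1
    rw [segJoin_cons]
    by_cases hn : i + 1 = n <;> simp [hn, List.append_assoc]

-- the whole remaining list as one wrap-free segment
theorem seg_all (wrap : Int) (fmtcs ind1 : List Char) (n : Nat) (G : List Int)
    (i : Nat) (done : List (List Char)) (cur : List Char)
    (h : ∀ t, t < G.length → ¬(wrap.natAbs ∣ (i + t) ∧ 0 < i + t)) :
    formatLoopA wrap fmtcs ind1 n G i done cur = (done, cur ++ segJoin n fmtcs G i) := by
  have := seg wrap fmtcs ind1 n G [] i done cur h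
  simpa [formatLoopA] using this

-- segJoin is the ', '-join of the formatted segment, plus a trailing ', ' unless it ends the array
theorem segJoin_eq (n : Nat) (fmtcs : List Char) :
    ∀ (G : List Int) (j : Nat), G ≠ [] → j + G.length ≤ n →
    segJoin n fmtcs G j
      = PySem.Chars.join [',', ' '] (G.map (pyFormatInt fmtcs))
        ++ (if j + G.length = n then [] else [',', ' ']) := by
  intro G
  induction G with
  | nil => intro j h _; exact absurd rfl h
  | cons x G ih =>
    intro j _ hle
    cases G with
    | nil => simp [segJoin, PySem.Chars.join_singleton]
    | cons y G' =>
      have hj1 : ¬ (j + 1 = n) := by simp at hle ⊢; omega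
      have hidx : j + (x :: y :: G').length = (j + 1) + (y :: G').length := by simp; omega
      rw [segJoin_cons, if_neg hj1, ih (j + 1) (by simp) (by simp at hle ⊢; omega), hidx]
      conv_rhs => rw [List.map_cons, List.map_cons, PySem.Chars.join_cons_cons]
      simp [List.append_assoc]

-- loop from a chunk boundary i > 0: finishes the previous line with '&' and renders the remaining chunks
theorem loopA_mid (wrap : Int) (fmtcs ind1 endcs : List Char) :
    ∀ (m : Nat) (F : List Int), F.length = m → F ≠ [] →
    ∀ (n i : Nat) (done : List (List Char)) (cur : List Char),
    n = i + F.length → 0 < i → wrap.natAbs ∣ i → wrap.natAbs ≠ 0 →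
    finishA endcs (formatLoopA wrap fmtcs ind1 n F i done cur)
      = done.map String.ofList ++ [String.ofList (cur ++ ['&'])]
        ++ renderB ind1 endcs ind1 (chunksJoinB wrap.natAbs (F.map (pyFormatInt fmtcs))) := by
  intro m
  induction m using Nat.strong_induction_on with
  | _ m ihm =>
  intro F hlen hne n i done cur hn hi hdvd hw
  obtain ⟨x, xs, rfl⟩ := List.exists_cons_of_ne_nil hne
  set w' := wrap.natAbs with hw'
  have hc : PySem.Int.mod (i : Int) wrap = 0 ∧ 0 < i := ⟨(modBridge wrap i).mpr hdvd, hi⟩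
  simp only [formatLoopA, if_pos hc]
  by_cases hle : (x :: xs).length ≤ w'
  · -- single remaining chunk
    rw [seg_all wrap fmtcs ind1 n xs (i + 1) _ _ (by
      rintro t ht ⟨hd, -⟩
      refine notdvd w' i (1 + t) hdvd (by omega) (by simp at hle; omega) ?_
      rwa [show i + (1 + t) = i + 1 + t by omega])]
    have hline : (if ¬(i + 1) = n then ind1 ++ pyFormatInt fmtcs x ++ [',', ' ']
          else ind1 ++ pyFormatInt fmtcs x)
        ++ segJoin n fmtcs xs (i + 1) = ind1 ++ segJoin n fmtcs (x :: xs) i := by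
      rw [segJoin_cons]
      by_cases hn1 : i + 1 = n <;> simp [hn1, List.append_assoc]
    rw [hline, segJoin_eq n fmtcs (x :: xs) i hne (by omega)]
    rw [if_pos (by omega)]
    have htake : (List.map (pyFormatInt fmtcs) (x :: xs)).take w'
        = List.map (pyFormatInt fmtcs) (x :: xs) :=
      List.take_of_length_le (by simpa using hle)
    have hdrop : (List.map (pyFormatInt fmtcs) (x :: xs)).drop w' = [] :=
      List.drop_eq_nil_of_le (by simpa using hle)
    rw [chunksJoinB_cons w' _ hw (by simp), htake, hdrop, chunksJoinB_nil]
    simp [finishA, renderB, List.append_assoc]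
  · -- full chunk, then recurse on the rest
    have hxlen : w' - 1 ≤ xs.length := by simp at hle; omega
    have htke : (xs.take (w' - 1)).length = w' - 1 := by
      rw [List.length_take]; omega
    conv_lhs => rw [show xs = xs.take (w' - 1) ++ xs.drop (w' - 1) from (List.take_append_drop _ _).symm]
    rw [seg wrap fmtcs ind1 n (xs.take (w' - 1)) (xs.drop (w' - 1)) (i + 1) _ _ (by
      rintro t ht ⟨hd, -⟩
      rw [htke] at ht
      refine notdvd w' i (1 + t) hdvd (by omega) (by omega) ?_
      rwa [show i + (1 + t) = i + 1 + t by omega])]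
    rw [htke, show i + 1 + (w' - 1) = i + w' by omega]
    have hFtake : (x :: xs).take w' = x :: xs.take (w' - 1) := by
      rw [show w' = (w' - 1) + 1 by omega, List.take_succ_cons]; simp
    have hFdrop : (x :: xs).drop w' = xs.drop (w' - 1) := by
      rw [show w' = (w' - 1) + 1 by omega, List.drop_succ_cons]; simp
    have hcur : (if ¬(i + 1) = n then ind1 ++ pyFormatInt fmtcs x ++ [',', ' ']
          else ind1 ++ pyFormatInt fmtcs x)
        ++ segJoin n fmtcs (xs.take (w' - 1)) (i + 1)
        = ind1 ++ (PySem.Chars.join [',', ' '] (((x :: xs).take w').map (pyFormatInt fmtcs)) ++ [',', ' ']) := by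
      have h1 : (if ¬(i + 1) = n then ind1 ++ pyFormatInt fmtcs x ++ [',', ' ']
            else ind1 ++ pyFormatInt fmtcs x)
          ++ segJoin n fmtcs (xs.take (w' - 1)) (i + 1)
          = ind1 ++ segJoin n fmtcs (x :: xs.take (w' - 1)) i := by
        rw [segJoin_cons]
        by_cases hn1 : i + 1 = n <;> simp [hn1, List.append_assoc]
      rw [h1, ← hFtake, segJoin_eq n fmtcs _ i (by simp [hFtake]) (by
        rw [hFtake]; simp [htke] at hn ⊢; simp at hle; omega)]
      rw [if_neg (by rw [hFtake]; simp [htke]; simp at hle hn ⊢; omega)]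
    rw [hcur]
    have hdne : xs.drop (w' - 1) ≠ [] := by
      intro hcon
      have := congrArg List.length hcon
      simp at this hle
      omega
    rw [ihm (xs.drop (w' - 1)).length
      (by simp only [List.length_cons] at hlen; simp at hle ⊢; omega) _ rfl hdne n (i + w')
      _ _ (by simp at hn hle ⊢; omega) (by omega) (Dvd.dvd.add hdvd dvd_rfl) hw]
    conv_rhs => rw [chunksJoinB_cons w' (List.map (pyFormatInt fmtcs) (x :: xs)) hw (by simp),
      ← List.map_take, ← List.map_drop, hFdrop]
    obtain ⟨c1, l1, hc1⟩ : ∃ c1 l1,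
        chunksJoinB w' ((xs.drop (w' - 1)).map (pyFormatInt fmtcs)) = c1 :: l1 := by
      rw [chunksJoinB_cons w' _ hw (by simpa using hdne)]
      exact ⟨_, _, rfl⟩
    rw [hc1, renderB_two]
    simp [List.append_assoc]

-- loop from index 0 renders all chunks, the first on the prefixed opening line
theorem loopA_zero (wrap : Int) (fmtcs ind1 endcs cur0 : List Char)
    (F : List Int) (hne : F ≠ []) (hw : wrap.natAbs ≠ 0) :
    finishA endcs (formatLoopA wrap fmtcs ind1 F.length F 0 [] cur0)
      = renderB ind1 endcs cur0 (chunksJoinB wrap.natAbs (F.map (pyFormatInt fmtcs))) := by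
  set w' := wrap.natAbs with hw'
  by_cases hle : F.length ≤ w'
  · rw [seg_all wrap fmtcs ind1 F.length F 0 [] cur0 (by
      rintro t ht ⟨hd, hpos⟩
      simp at hd hpos
      exact absurd (Nat.le_of_dvd hpos hd) (by omega))]
    rw [segJoin_eq F.length fmtcs F 0 hne (by omega), if_pos (by omega)]
    have htake : (F.map (pyFormatInt fmtcs)).take w' = F.map (pyFormatInt fmtcs) :=
      List.take_of_length_le (by simpa using hle)
    have hdrop : (F.map (pyFormatInt fmtcs)).drop w' = [] :=
      List.drop_eq_nil_of_le (by simpa using hle)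
    rw [chunksJoinB_cons w' _ hw (by simpa using hne), htake, hdrop, chunksJoinB_nil]
    simp [finishA, renderB, List.append_assoc]
  · have htke : (F.take w').length = w' := by
      rw [List.length_take]; omega
    rw [show formatLoopA wrap fmtcs ind1 F.length F 0 [] cur0
        = formatLoopA wrap fmtcs ind1 F.length (F.take w' ++ F.drop w') 0 [] cur0 by
      rw [List.take_append_drop]]
    rw [seg wrap fmtcs ind1 F.length (F.take w') (F.drop w') 0 [] cur0 (by
      rintro t ht ⟨hd, hpos⟩
      rw [htke] at ht
      simp at hd hpos
      exact absurd (Nat.le_of_dvd hpos hd) (by omega))]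
    rw [htke, Nat.zero_add]
    rw [segJoin_eq F.length fmtcs (F.take w') 0 (by
        intro hcon; have := congrArg List.length hcon; rw [htke] at this; simp at this; omega)
      (by omega), if_neg (by rw [htke]; omega)]
    rw [loopA_mid wrap fmtcs ind1 endcs (F.drop w').length _ rfl
      (by intro hcon; have := congrArg List.length hcon; simp at this; omega)
      F.length w' _ _ (by simp; omega) (by omega) dvd_rfl hw]
    conv_rhs => rw [chunksJoinB_cons w' (List.map (pyFormatInt fmtcs) F) hw (by simpa using hne),
      ← List.map_take, ← List.map_drop]
    obtain ⟨c1, l1, hc1⟩ : ∃ c1 l1,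
        chunksJoinB w' ((F.drop w').map (pyFormatInt fmtcs)) = c1 :: l1 := by
      rw [chunksJoinB_cons w' _ hw (by
        intro hcon; have := congrArg List.length hcon; simp at this; omega)]
      exact ⟨_, _, rfl⟩
    rw [hc1, renderB_two]
    simp [List.append_assoc]

-- ===== VERDICT (by name: the statement is the Claim_ definition above) =====
theorem format_array_spec : Claim_equal_format_array := by
  intro array indent fmt wrap bg en _ hpre
  show format_array array indent fmt wrap bg en = format_array_alt array indent fmt wrap bg en
  by_cases harr : array = []
  · subst harr
    simp [format_array, format_array_alt, formatLoopA, List.append_assoc]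
  · rcases hpre with h | ⟨hwrap, -⟩
    · exact absurd h harr
    have hw : wrap.natAbs ≠ 0 := by omega
    show finishA en.toList
        (formatLoopA wrap fmt.toList (pySpaces (indent + 1)) array.length array 0 []
          (pySpaces indent ++ bg.toList)) = _
    rw [loopA_zero wrap fmt.toList (pySpaces (indent + 1)) en.toList
      (pySpaces indent ++ bg.toList) array harr hw]
    unfold format_array_alt
    rw [if_neg (by simpa using harr), chunksB_eq wrap hwrap]
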